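-- pv_equiv track=rewrite | github.com/Ericbf-10/ERxn_Predicting-enzymatic-reactions-using-attention-based-DL | scripts/04_mol_name_to_smile.py | get_synonym
-- ===== SOURCE A (Python) =====
-- def get_synonym(compound):
--     # try to get synonyms for some compounds
--     for i in range(20):
--         if f'{i}-alpha' in compound:
--             compound = compound.replace(f'{i}-alpha', f'{i}alpha')
--
--     for i in range(20):
--         if f'{i}-beta' in compound:
--             compound = compound.replace(f'{i}-beta', f'{i}beta')
--
--     return compound
-- ===== SOURCE B (Python) =====
-- import re
--
-- def get_synonym(compound):
--     # try to get synonyms for some compounds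
--     compound = re.sub(r'(\d)-alpha', r'\1alpha', compound)
--     compound = re.sub(r'(\d)-beta', r'\1beta', compound)
--     return compound
-- ===== Notes on version B (the rewrite author's own statement) =====
-- stated objective: idiomatic
-- what changed: Replaces the two fixed 20-iteration replace loops (40 guarded substring scans) with one regex substitution per suffix word, a single left-to-right pass each that drops the dash between a digit and the suffix.
import Mathlib
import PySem

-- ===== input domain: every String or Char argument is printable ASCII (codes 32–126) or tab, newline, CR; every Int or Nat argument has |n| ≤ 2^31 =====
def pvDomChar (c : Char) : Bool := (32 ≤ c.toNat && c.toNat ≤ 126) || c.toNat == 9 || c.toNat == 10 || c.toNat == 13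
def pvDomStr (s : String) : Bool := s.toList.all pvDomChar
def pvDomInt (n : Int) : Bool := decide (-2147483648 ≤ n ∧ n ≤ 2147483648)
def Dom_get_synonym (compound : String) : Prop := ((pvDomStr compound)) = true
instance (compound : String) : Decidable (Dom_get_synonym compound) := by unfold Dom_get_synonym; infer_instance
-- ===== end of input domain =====

-- B replaces A's two fixed 20-iteration replace loops by one regex-style left-to-right
-- substitution pass per suffix ('alpha', 'beta'); same return value, different traversal.

-- ===== PORT A =====
-- loop body of A's `for i in range(20)` (same for both loops, with w = "alpha"/"beta"):
-- `if f'{i}-{w}' in compound: compound = compound.replace(f'{i}-{w}', f'{i}{w}')`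
def pyStep (w : List Char) (comp : List Char) (i : Int) : List Char :=
  if PySem.Chars.isIn (PySem.Int.toChars i ++ '-' :: w) comp then
    PySem.Chars.replace comp (PySem.Int.toChars i ++ '-' :: w) (PySem.Int.toChars i ++ w)
  else comp

def get_synonym (compound : String) : String :=
  let c1 := (PySem.List.pyRange 0 20 1).foldl (pyStep ['a', 'l', 'p', 'h', 'a']) compound.toList
  let c2 := (PySem.List.pyRange 0 20 1).foldl (pyStep ['b', 'e', 't', 'a']) c1
  String.ofList c2

-- ===== PORT B =====
-- hand port of re.sub(r'(\d)-w', r'\1w', s): one left-to-right pass, leftmost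
-- non-overlapping matches, scanning resumes after each match — exact for this
-- pattern (a digit, a literal '-', the literal word w; \d = '0'..'9' on the ASCII domain).
def reSubDigitDash (w : List Char) : List Char → List Char
  | [] => []
  | c :: t =>
    if c.isDigit && ('-' :: w).isPrefixOf t then
      c :: (w ++ reSubDigitDash w (List.drop (w.length + 1) t))
    else
      c :: reSubDigitDash w t
termination_by l => l.length
decreasing_by all_goals (simp; try omega)

def get_synonym_alt (compound : String) : String :=
  String.ofList
    (reSubDigitDash ['b', 'e', 't', 'a']
      (reSubDigitDash ['a', 'l', 'p', 'h', 'a'] compound.toList))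

-- ===== PRECONDITION & SPEC =====
def Spec_get_synonym (compound : String) (out : String) : Prop := out = get_synonym_alt compound
instance (compound : String) (out : String) : Decidable (Spec_get_synonym compound out) := by unfold Spec_get_synonym; infer_instance

-- ===== CLAIM (what is proved, stated in full; the proofs are below) =====
def Claim_equal_get_synonym : Prop := ∀ (compound : String), Dom_get_synonym compound → Spec_get_synonym compound (get_synonym compound)

-- ===== LEMMAS AND PROOFS =====

def scanP (p : Char → Bool) (w : List Char) : List Char → List Char
  | [] => []
  | c :: t =>
    if p c && ('-' :: w).isPrefixOf t then
      c :: (w ++ scanP p w (List.drop (w.length + 1) t))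
    else
      c :: scanP p w t
termination_by l => l.length
decreasing_by all_goals (simp; try omega)

theorem scanP_append (p : Char → Bool) (w u x : List Char) (h : ∀ c ∈ u, p c = false) :
    scanP p w (u ++ x) = u ++ scanP p w x := by
  induction u with
  | nil => rfl
  | cons a u ih =>
    have ha : p a = false := h a (by simp)
    simp only [List.cons_append, scanP, ha, Bool.false_and, Bool.false_eq_true, if_false]
    rw [ih (fun c hc => h c (by simp [hc]))]

theorem head_scanP (p : Char → Bool) (w : List Char) (c : Char) (t : List Char) :
    ∃ r, scanP p w (c :: t) = c :: r := by
  simp only [scanP]; split <;> exact ⟨_, rfl⟩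

theorem prefix_scanP_iff (p : Char → Bool) (w : List Char) (u : List Char)
    (h : ∀ c ∈ u, p c = false) : ∀ t, (u <+: scanP p w t ↔ u <+: t) := by
  induction u with
  | nil => intro t; simp
  | cons a u ih =>
    intro t
    cases t with
    | nil => simp [scanP]
    | cons c t0 =>
      obtain ⟨r, hr⟩ := head_scanP p w c t0
      by_cases hac : a = c
      · subst hac
        have ha : p a = false := h a (by simp)
        have hr' : r = scanP p w t0 := by
          simp only [scanP, ha, Bool.false_and, Bool.false_eq_true, if_false] at hr
          exact (List.cons_injective.eq_iff.mp hr.symm) ▸ rfl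
        rw [hr, hr', List.cons_prefix_cons, List.cons_prefix_cons,
          ih (fun c hc => h c (by simp [hc])) t0]
      · rw [hr, List.cons_prefix_cons, List.cons_prefix_cons]
        simp [hac]


-- replace characterization
theorem go_spec (d : Char) (w : List Char) : ∀ (fuel : Nat) (l acc : List Char), l.length ≤ fuel →
    PySem.Chars.replace.go (d :: '-' :: w) (d :: w) fuel l acc
      = acc.reverse ++ scanP (fun c => c == d) w l := by
  intro fuel
  induction fuel with
  | zero =>
    intro l acc hl
    have : l = [] := by cases l <;> simp_all
    subst this
    simp [PySem.Chars.replace.go, scanP]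
  | succ fuel ih =>
    intro l acc hl
    cases l with
    | nil => simp [PySem.Chars.replace.go, scanP]
    | cons c t =>
      rw [PySem.Chars.replace.go.eq_def]
      simp only []
      by_cases hm : (d :: '-' :: w).isPrefixOf (c :: t) = true
      · have hcd : c = d := (beq_iff_eq.mp (Bool.and_elim_left (by
          simpa only [List.isPrefixOf_cons₂] using hm))).symm
        have hpre : ('-' :: w).isPrefixOf t = true :=
          Bool.and_elim_right (by simpa only [List.isPrefixOf_cons₂] using hm)
        subst hcd
        rw [if_pos hm]
        have hdrop : List.drop (c :: '-' :: w).length (c :: t) = List.drop (w.length + 1) t := by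
          simp
        rw [hdrop, ih _ _ (by
          have := List.length_drop (l := t) (i := w.length + 1)
          simp at hl ⊢; omega)]
        have hscan : scanP (fun x => x == c) w (c :: t)
            = c :: (w ++ scanP (fun x => x == c) w (List.drop (w.length + 1) t)) := by
          rw [scanP]
          rw [if_pos (by simp [hpre])]
        rw [hscan]
        simp
      · rw [if_neg hm]
        rw [ih _ _ (by simp at hl ⊢; omega)]
        have hscan : scanP (fun x => x == d) w (c :: t) = c :: scanP (fun x => x == d) w t := by
          rw [scanP]
          rw [if_neg (by
            simp only [List.isPrefixOf_cons₂] at hm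
            intro hcontra
            apply hm
            rcases Bool.and_eq_true_iff.mp hcontra with ⟨h1, h2⟩
            rw [beq_iff_eq] at h1
            subst h1
            simp [h2])]
        rw [hscan]
        simp

theorem replace_eq_scanP (d : Char) (w l : List Char) :
    PySem.Chars.replace l (d :: '-' :: w) (d :: w) = scanP (fun c => c == d) w l := by
  rw [PySem.Chars.replace]
  rw [if_neg (by simp)]
  simpa using go_spec d w l.length l [] (le_refl _)

theorem scanP_id_of_not_infix (d : Char) (w : List Char) :
    ∀ l : List Char, ¬ ((d :: '-' :: w) <:+: l) → scanP (fun c => c == d) w l = l := by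
  intro l
  induction l with
  | nil => intro _; simp [scanP]
  | cons c t ih =>
    intro hni
    rw [scanP, if_neg (by
      intro hcontra
      rcases Bool.and_eq_true_iff.mp hcontra with ⟨h1, h2⟩
      rw [beq_iff_eq] at h1
      subst h1
      exact hni ((PySem.Chars.startswith_iff (c :: t) (c :: '-' :: w)).mp (by simp [PySem.Chars.startswith, h2]) |>.isInfix))]
    rw [ih (fun hinf => hni (List.infix_cons hinf))]

theorem step_eq_scanP (d : Char) (w l : List Char) :
    (if PySem.Chars.isIn (d :: '-' :: w) l then
        PySem.Chars.replace l (d :: '-' :: w) (d :: w) else l)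
      = scanP (fun c => c == d) w l := by
  by_cases h : PySem.Chars.isIn (d :: '-' :: w) l = true
  · rw [if_pos h, replace_eq_scanP]
  · rw [if_neg h, scanP_id_of_not_infix d w l
      (by
        intro hinf
        exact h ((PySem.Chars.isIn_iff_infix _ _).mpr hinf))]

-- cons-step equations for scanP
theorem scanP_cons_pos (p : Char → Bool) (w : List Char) (c : Char) (t : List Char)
    (h : (p c && ('-' :: w).isPrefixOf t) = true) :
    scanP p w (c :: t) = c :: (w ++ scanP p w (List.drop (w.length + 1) t)) := by
  rw [scanP, if_pos h]

theorem scanP_cons_neg (p : Char → Bool) (w : List Char) (c : Char) (t : List Char)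
    (h : (p c && ('-' :: w).isPrefixOf t) = false) :
    scanP p w (c :: t) = c :: scanP p w t := by
  rw [scanP, if_neg (by simp [h])]

-- merge: running the (· == d) scan after a q-scan equals one scan with the union predicate
theorem scanP_merge (q : Char → Bool) (d : Char) (w : List Char)
    (hqd : q d = false) (hw : ∀ c ∈ ('-' :: w), q c = false) (hdw : d ∉ w) :
    ∀ (n : Nat) (l : List Char), l.length ≤ n →
      scanP (fun c => c == d) w (scanP q w l) = scanP (fun c => q c || c == d) w l := by
  intro n
  induction n with
  | zero =>
    intro l hl
    have : l = [] := by cases l <;> simp_all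
    subst this; simp [scanP]
  | succ n ih =>
    intro l hl
    cases l with
    | nil => simp [scanP]
    | cons c t =>
      by_cases hq : q c = true ∧ ('-' :: w).isPrefixOf t = true
      · obtain ⟨hq1, hq2⟩ := hq
        have hpc : (c == d) = false := by
          rcases Bool.eq_false_or_eq_true (c == d) with h | h
          · rw [beq_iff_eq] at h; subst h; rw [hq1] at hqd; exact absurd hqd (by simp)
          · exact h
        rw [scanP_cons_pos q w c t (by simp [hq1, hq2])]
        rw [scanP_cons_neg (fun c => c == d) w c _ (by simp [hpc])]
        rw [scanP_append (fun c => c == d) w w _ (by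
          intro a ha
          rcases Bool.eq_false_or_eq_true (a == d) with h | h
          · rw [beq_iff_eq] at h; subst h; exact absurd ha hdw
          · exact h)]
        rw [ih (List.drop (w.length + 1) t) (by simp at hl ⊢; omega)]
        rw [scanP_cons_pos (fun c => q c || c == d) w c t (by simp [hq1, hq2])]
      · by_cases hp : (c == d) = true ∧ ('-' :: w).isPrefixOf t = true
        · obtain ⟨hp1, hp2⟩ := hp
          have hq1 : q c = false := by
            rcases Bool.eq_false_or_eq_true (q c) with h | h
            · exact absurd ⟨h, hp2⟩ hq
            · exact h
          rw [scanP_cons_neg q w c t (by simp [hq1])]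
          obtain ⟨t₂, ht⟩ := (PySem.Chars.startswith_iff t ('-' :: w)).mp
            (by simp [PySem.Chars.startswith, hp2])
          have hscanq : scanP q w t = ('-' :: w) ++ scanP q w t₂ := by
            rw [← ht]; exact scanP_append q w ('-' :: w) t₂ hw
          rw [scanP_cons_pos (fun c => c == d) w c (scanP q w t) (by
            simp only [hp1, Bool.true_and, hscanq]
            have hsw := (PySem.Chars.startswith_iff ('-' :: w ++ scanP q w t₂) ('-' :: w)).mpr
              ⟨scanP q w t₂, rfl⟩
            simp only [PySem.Chars.startswith] at hsw
            exact hsw)]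
          have hdrop1 : List.drop (w.length + 1) (scanP q w t)
              = scanP q w t₂ := by
            rw [hscanq]; simp
          have hdrop2 : List.drop (w.length + 1) t = t₂ := by
            rw [← ht]; simp
          rw [hdrop1, ih t₂ (by
            subst ht; simp at hl ⊢; omega)]
          rw [scanP_cons_pos (fun c => q c || c == d) w c t (by simp [hp1, hp2]), hdrop2]
        · have hg1 : (q c && ('-' :: w).isPrefixOf t) = false := by
            rcases Bool.eq_false_or_eq_true (q c) with h | h
            · rcases Bool.eq_false_or_eq_true (('-' :: w).isPrefixOf t) with h2 | h2
              · exact absurd ⟨h, h2⟩ hq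
              · simp [h2]
            · simp [h]
          rw [scanP_cons_neg q w c t hg1]
          have hpref : ('-' :: w).isPrefixOf (scanP q w t) = ('-' :: w).isPrefixOf t := by
            rcases Bool.eq_false_or_eq_true (('-' :: w).isPrefixOf t) with h2 | h2
            · rw [h2]
              exact (PySem.Chars.startswith_iff _ _).mpr
                ((prefix_scanP_iff q w ('-' :: w) hw t).mpr
                  ((PySem.Chars.startswith_iff t _).mp (by simp [PySem.Chars.startswith, h2])))
            · rw [h2]
              rcases Bool.eq_false_or_eq_true (('-' :: w).isPrefixOf (scanP q w t)) with h3 | h3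
              · exfalso
                have h4 : ('-' :: w) <+: t := (prefix_scanP_iff q w ('-' :: w) hw t).mp
                  ((PySem.Chars.startswith_iff _ _).mp (by simp [PySem.Chars.startswith, h3]))
                have h5 : ('-' :: w).isPrefixOf t = true := by
                  simpa [PySem.Chars.startswith] using (PySem.Chars.startswith_iff t ('-' :: w)).mpr h4
                simp [h5] at h2
              · exact h3
          rw [scanP_cons_neg (fun c => c == d) w c (scanP q w t) (by
            rcases Bool.eq_false_or_eq_true (c == d) with h | h
            · rw [beq_iff_eq] at h; subst h
              rcases Bool.eq_false_or_eq_true (('-' :: w).isPrefixOf t) with h2 | h2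
              · exact absurd ⟨by simp, h2⟩ hp
              · simp [hpref, h2]
            · simp [h])]
          rw [ih t (by simp at hl; omega)]
          rw [scanP_cons_neg (fun c => q c || c == d) w c t (by
            rcases Bool.eq_false_or_eq_true (('-' :: w).isPrefixOf t) with h2 | h2
            · have hqf : q c = false := by
                rcases Bool.eq_false_or_eq_true (q c) with h | h
                · exact absurd ⟨h, h2⟩ hq
                · exact h
              have hdf : (c == d) = false := by
                rcases Bool.eq_false_or_eq_true (c == d) with h | h
                · exact absurd ⟨h, h2⟩ hp
                · exact h
              simp [hqf, hdf]
            · simp [h2])]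

-- a digit-led pattern cannot start inside a run of non-digit characters
theorem infix_skip (d : Char) (hd : d.isDigit = true) (w : List Char) :
    ∀ (u : List Char), (∀ c ∈ u, c.isDigit = false) → ∀ (S : List Char),
      (d :: '-' :: w) <:+: (u ++ S) → (d :: '-' :: w) <:+: S := by
  intro u
  induction u with
  | nil => intro _ S h; simpa using h
  | cons a u ih =>
    intro hu S h
    rcases List.infix_cons_iff.mp h with hpre | hinf
    · exfalso
      rcases List.cons_prefix_cons.mp hpre with ⟨h1, -⟩
      rw [← h1] at hu
      have := hu d (by simp)
      rw [hd] at this; exact absurd this (by simp)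
    · exact ih (fun c hc => hu c (by simp [hc])) S hinf

-- the output of the digit scan has no remaining digit-dash-w occurrence
theorem scanP_no_pat (w : List Char) (hdig : ∀ c ∈ ('-' :: w), c.isDigit = false)
    (a : Char) (w' : List Char) (hwa : w = a :: w') (ha : a ≠ '-') :
    ∀ (n : Nat) (l : List Char), l.length ≤ n → ∀ d, d.isDigit = true →
      ¬ ((d :: '-' :: w) <:+: scanP (fun c => c.isDigit) w l) := by
  intro n
  induction n with
  | zero =>
    intro l hl d hd
    have : l = [] := by cases l <;> simp_all
    subst this; simp [scanP]
  | succ n ih =>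
    intro l hl d hd
    cases l with
    | nil => simp [scanP]
    | cons c t =>
      by_cases hm : (c.isDigit && ('-' :: w).isPrefixOf t) = true
      · rw [scanP_cons_pos _ w c t hm]
        intro hinf
        rcases List.infix_cons_iff.mp hinf with hpre | hinf2
        · rcases List.cons_prefix_cons.mp hpre with ⟨-, h2⟩
          rw [hwa] at h2
          rcases List.cons_prefix_cons.mp (by simpa [hwa] using h2) with ⟨h3, -⟩
          exact ha h3.symm
        · have hinf3 := infix_skip d hd w w (fun c hc => hdig c (by simp [hc])) _ hinf2
          exact ih (List.drop (w.length + 1) t) (by simp at hl ⊢; omega) d hd hinf3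
      · rw [scanP_cons_neg _ w c t (Bool.eq_false_iff.mpr hm)]
        intro hinf
        rcases List.infix_cons_iff.mp hinf with hpre | hinf2
        · rcases List.cons_prefix_cons.mp hpre with ⟨h1, h2⟩
          have h3 : ('-' :: w) <+: t :=
            (prefix_scanP_iff (fun c => c.isDigit) w ('-' :: w) hdig t).mp h2
          have h4 : ('-' :: w).isPrefixOf t = true := by
            simpa [PySem.Chars.startswith] using
              (PySem.Chars.startswith_iff t ('-' :: w)).mpr h3
          rw [← h1] at hm
          simp [hd, h4] at hm
        · exact ih t (by simp at hl; omega) d hd hinf2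

theorem isDigit_iff_toNat (c : Char) : c.isDigit = true ↔ 48 ≤ c.toNat ∧ c.toNat ≤ 57 := by
  unfold Char.isDigit
  simp [UInt32.le_iff_toNat_le]

theorem char_digit_cases (c : Char) : ((((((((((c == '0') || c == '1') || c == '2') || c == '3') || c == '4') || c == '5') || c == '6') || c == '7') || c == '8') || c == '9') = c.isDigit := by
  apply Bool.eq_iff_iff.mpr
  simp only [Bool.or_eq_true, beq_iff_eq]
  constructor
  · intro h
    rcases h with ((((((((h|h)|h)|h)|h)|h)|h)|h)|h)|h <;> (subst h; decide)
  · intro h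
    obtain ⟨g1, g2⟩ := (isDigit_iff_toNat c).mp h
    have hn : c.toNat = 48 ∨ c.toNat = 49 ∨ c.toNat = 50 ∨ c.toNat = 51 ∨ c.toNat = 52 ∨
        c.toNat = 53 ∨ c.toNat = 54 ∨ c.toNat = 55 ∨ c.toNat = 56 ∨ c.toNat = 57 := by omega
    have hch : ∀ (d : Char), c.toNat = d.toNat → c = d := by
      intro d hd
      exact Char.ext (UInt32.toNat_inj.mp hd)
    rcases hn with h|h|h|h|h|h|h|h|h|h
    · exact Or.inl (Or.inl (Or.inl (Or.inl (Or.inl (Or.inl (Or.inl (Or.inl (Or.inl (hch '0' h)))))))))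
    · exact Or.inl (Or.inl (Or.inl (Or.inl (Or.inl (Or.inl (Or.inl (Or.inl (Or.inr (hch '1' h)))))))))
    · exact Or.inl (Or.inl (Or.inl (Or.inl (Or.inl (Or.inl (Or.inl (Or.inr (hch '2' h))))))))
    · exact Or.inl (Or.inl (Or.inl (Or.inl (Or.inl (Or.inl (Or.inr (hch '3' h)))))))
    · exact Or.inl (Or.inl (Or.inl (Or.inl (Or.inl (Or.inr (hch '4' h))))))
    · exact Or.inl (Or.inl (Or.inl (Or.inl (Or.inr (hch '5' h)))))
    · exact Or.inl (Or.inl (Or.inl (Or.inr (hch '6' h))))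
    · exact Or.inl (Or.inl (Or.inr (hch '7' h)))
    · exact Or.inl (Or.inr (hch '8' h))
    · exact Or.inr (hch '9' h)

theorem scanP_congr (p p' : Char → Bool) (w : List Char) (h : ∀ c, p c = p' c) (l : List Char) :
    scanP p w l = scanP p' w l := by
  have hpp : p = p' := funext h
  rw [hpp]

theorem isIn_two_digit_false (w : List Char) (hdig : ∀ c ∈ ('-' :: w), c.isDigit = false)
    (a : Char) (w' : List Char) (hwa : w = a :: w') (ha : a ≠ '-')
    (c1 c2 : Char) (h2 : c2.isDigit = true) (l : List Char) :
    PySem.Chars.isIn (c1 :: c2 :: '-' :: w) (scanP (fun c => c.isDigit) w l) = false := by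
  apply (PySem.Chars.isIn_eq_false_iff _ _).mpr
  intro hinf
  have hsub : (c2 :: '-' :: w) <:+: scanP (fun c => c.isDigit) w l :=
    List.IsInfix.trans ⟨[c1], [], by simp⟩ hinf
  exact scanP_no_pat w hdig a w' hwa ha l.length l (le_refl _) c2 h2 hsub

-- the A-side loop over range(20) collapses to one digit scan
theorem chain_scan (w : List Char) (hdig : ∀ c ∈ ('-' :: w), c.isDigit = false)
    (a : Char) (w' : List Char) (hwa : w = a :: w') (ha : a ≠ '-') (l : List Char) :
    (PySem.List.pyRange 0 20 1).foldl (pyStep w) l = scanP (fun c => c.isDigit) w l := by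
  have hrange : PySem.List.pyRange 0 20 1
      = [0,1,2,3,4,5,6,7,8,9,10,11,12,13,14,15,16,17,18,19] := by decide
  rw [hrange]
  simp only [List.foldl_cons, List.foldl_nil]
  have e0 : ∀ m : List Char, pyStep w m 0 = scanP (fun c => c == '0') w m := by
    intro m
    have ht : PySem.Int.toChars 0 = ['0'] := by decide
    simp only [pyStep, ht, List.cons_append, List.nil_append]
    exact step_eq_scanP '0' w m
  have e1 : ∀ m : List Char, pyStep w m 1 = scanP (fun c => c == '1') w m := by
    intro m
    have ht : PySem.Int.toChars 1 = ['1'] := by decide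
    simp only [pyStep, ht, List.cons_append, List.nil_append]
    exact step_eq_scanP '1' w m
  have e2 : ∀ m : List Char, pyStep w m 2 = scanP (fun c => c == '2') w m := by
    intro m
    have ht : PySem.Int.toChars 2 = ['2'] := by decide
    simp only [pyStep, ht, List.cons_append, List.nil_append]
    exact step_eq_scanP '2' w m
  have e3 : ∀ m : List Char, pyStep w m 3 = scanP (fun c => c == '3') w m := by
    intro m
    have ht : PySem.Int.toChars 3 = ['3'] := by decide
    simp only [pyStep, ht, List.cons_append, List.nil_append]
    exact step_eq_scanP '3' w m
  have e4 : ∀ m : List Char, pyStep w m 4 = scanP (fun c => c == '4') w m := by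
    intro m
    have ht : PySem.Int.toChars 4 = ['4'] := by decide
    simp only [pyStep, ht, List.cons_append, List.nil_append]
    exact step_eq_scanP '4' w m
  have e5 : ∀ m : List Char, pyStep w m 5 = scanP (fun c => c == '5') w m := by
    intro m
    have ht : PySem.Int.toChars 5 = ['5'] := by decide
    simp only [pyStep, ht, List.cons_append, List.nil_append]
    exact step_eq_scanP '5' w m
  have e6 : ∀ m : List Char, pyStep w m 6 = scanP (fun c => c == '6') w m := by
    intro m
    have ht : PySem.Int.toChars 6 = ['6'] := by decide
    simp only [pyStep, ht, List.cons_append, List.nil_append]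
    exact step_eq_scanP '6' w m
  have e7 : ∀ m : List Char, pyStep w m 7 = scanP (fun c => c == '7') w m := by
    intro m
    have ht : PySem.Int.toChars 7 = ['7'] := by decide
    simp only [pyStep, ht, List.cons_append, List.nil_append]
    exact step_eq_scanP '7' w m
  have e8 : ∀ m : List Char, pyStep w m 8 = scanP (fun c => c == '8') w m := by
    intro m
    have ht : PySem.Int.toChars 8 = ['8'] := by decide
    simp only [pyStep, ht, List.cons_append, List.nil_append]
    exact step_eq_scanP '8' w m
  have e9 : ∀ m : List Char, pyStep w m 9 = scanP (fun c => c == '9') w m := by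
    intro m
    have ht : PySem.Int.toChars 9 = ['9'] := by decide
    simp only [pyStep, ht, List.cons_append, List.nil_append]
    exact step_eq_scanP '9' w m
  rw [e0, e1, e2, e3, e4, e5, e6, e7, e8, e9]
  have m1 : scanP (fun c => c == '1') w (scanP (fun c => c == '0') w l)
      = scanP (fun c => c == '0' || c == '1') w l :=
    scanP_merge (fun c => c == '0') '1' w (by decide)
      (by
        intro x hx
        have hdx := hdig x hx
        by_contra hne
        rw [Bool.not_eq_false] at hne
        simp only [beq_iff_eq] at hne
        subst hne
        exact absurd hdx (by decide))
      (by
        intro hmem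
        have hdm := hdig '1' (List.mem_cons_of_mem _ hmem)
        exact absurd hdm (by decide))
      l.length l (le_refl _)
  have m2 : scanP (fun c => c == '2') w (scanP (fun c => c == '0' || c == '1') w l)
      = scanP (fun c => c == '0' || c == '1' || c == '2') w l :=
    scanP_merge (fun c => c == '0' || c == '1') '2' w (by decide)
      (by
        intro x hx
        have hdx := hdig x hx
        by_contra hne
        rw [Bool.not_eq_false] at hne
        simp only [Bool.or_eq_true, beq_iff_eq] at hne
        rcases hne with (h|h) <;> (subst h; exact absurd hdx (by decide)))
      (by
        intro hmem
        have hdm := hdig '2' (List.mem_cons_of_mem _ hmem)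
        exact absurd hdm (by decide))
      l.length l (le_refl _)
  have m3 : scanP (fun c => c == '3') w (scanP (fun c => c == '0' || c == '1' || c == '2') w l)
      = scanP (fun c => c == '0' || c == '1' || c == '2' || c == '3') w l :=
    scanP_merge (fun c => c == '0' || c == '1' || c == '2') '3' w (by decide)
      (by
        intro x hx
        have hdx := hdig x hx
        by_contra hne
        rw [Bool.not_eq_false] at hne
        simp only [Bool.or_eq_true, beq_iff_eq] at hne
        rcases hne with ((h|h)|h) <;> (subst h; exact absurd hdx (by decide)))
      (by
        intro hmem
        have hdm := hdig '3' (List.mem_cons_of_mem _ hmem)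
        exact absurd hdm (by decide))
      l.length l (le_refl _)
  have m4 : scanP (fun c => c == '4') w (scanP (fun c => c == '0' || c == '1' || c == '2' || c == '3') w l)
      = scanP (fun c => c == '0' || c == '1' || c == '2' || c == '3' || c == '4') w l :=
    scanP_merge (fun c => c == '0' || c == '1' || c == '2' || c == '3') '4' w (by decide)
      (by
        intro x hx
        have hdx := hdig x hx
        by_contra hne
        rw [Bool.not_eq_false] at hne
        simp only [Bool.or_eq_true, beq_iff_eq] at hne
        rcases hne with (((h|h)|h)|h) <;> (subst h; exact absurd hdx (by decide)))
      (by
        intro hmem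
        have hdm := hdig '4' (List.mem_cons_of_mem _ hmem)
        exact absurd hdm (by decide))
      l.length l (le_refl _)
  have m5 : scanP (fun c => c == '5') w (scanP (fun c => c == '0' || c == '1' || c == '2' || c == '3' || c == '4') w l)
      = scanP (fun c => c == '0' || c == '1' || c == '2' || c == '3' || c == '4' || c == '5') w l :=
    scanP_merge (fun c => c == '0' || c == '1' || c == '2' || c == '3' || c == '4') '5' w (by decide)
      (by
        intro x hx
        have hdx := hdig x hx
        by_contra hne
        rw [Bool.not_eq_false] at hne
        simp only [Bool.or_eq_true, beq_iff_eq] at hne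
        rcases hne with ((((h|h)|h)|h)|h) <;> (subst h; exact absurd hdx (by decide)))
      (by
        intro hmem
        have hdm := hdig '5' (List.mem_cons_of_mem _ hmem)
        exact absurd hdm (by decide))
      l.length l (le_refl _)
  have m6 : scanP (fun c => c == '6') w (scanP (fun c => c == '0' || c == '1' || c == '2' || c == '3' || c == '4' || c == '5') w l)
      = scanP (fun c => c == '0' || c == '1' || c == '2' || c == '3' || c == '4' || c == '5' || c == '6') w l :=
    scanP_merge (fun c => c == '0' || c == '1' || c == '2' || c == '3' || c == '4' || c == '5') '6' w (by decide)
      (by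
        intro x hx
        have hdx := hdig x hx
        by_contra hne
        rw [Bool.not_eq_false] at hne
        simp only [Bool.or_eq_true, beq_iff_eq] at hne
        rcases hne with (((((h|h)|h)|h)|h)|h) <;> (subst h; exact absurd hdx (by decide)))
      (by
        intro hmem
        have hdm := hdig '6' (List.mem_cons_of_mem _ hmem)
        exact absurd hdm (by decide))
      l.length l (le_refl _)
  have m7 : scanP (fun c => c == '7') w (scanP (fun c => c == '0' || c == '1' || c == '2' || c == '3' || c == '4' || c == '5' || c == '6') w l)
      = scanP (fun c => c == '0' || c == '1' || c == '2' || c == '3' || c == '4' || c == '5' || c == '6' || c == '7') w l :=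
    scanP_merge (fun c => c == '0' || c == '1' || c == '2' || c == '3' || c == '4' || c == '5' || c == '6') '7' w (by decide)
      (by
        intro x hx
        have hdx := hdig x hx
        by_contra hne
        rw [Bool.not_eq_false] at hne
        simp only [Bool.or_eq_true, beq_iff_eq] at hne
        rcases hne with ((((((h|h)|h)|h)|h)|h)|h) <;> (subst h; exact absurd hdx (by decide)))
      (by
        intro hmem
        have hdm := hdig '7' (List.mem_cons_of_mem _ hmem)
        exact absurd hdm (by decide))
      l.length l (le_refl _)
  have m8 : scanP (fun c => c == '8') w (scanP (fun c => c == '0' || c == '1' || c == '2' || c == '3' || c == '4' || c == '5' || c == '6' || c == '7') w l)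
      = scanP (fun c => c == '0' || c == '1' || c == '2' || c == '3' || c == '4' || c == '5' || c == '6' || c == '7' || c == '8') w l :=
    scanP_merge (fun c => c == '0' || c == '1' || c == '2' || c == '3' || c == '4' || c == '5' || c == '6' || c == '7') '8' w (by decide)
      (by
        intro x hx
        have hdx := hdig x hx
        by_contra hne
        rw [Bool.not_eq_false] at hne
        simp only [Bool.or_eq_true, beq_iff_eq] at hne
        rcases hne with (((((((h|h)|h)|h)|h)|h)|h)|h) <;> (subst h; exact absurd hdx (by decide)))
      (by
        intro hmem
        have hdm := hdig '8' (List.mem_cons_of_mem _ hmem)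
        exact absurd hdm (by decide))
      l.length l (le_refl _)
  have m9 : scanP (fun c => c == '9') w (scanP (fun c => c == '0' || c == '1' || c == '2' || c == '3' || c == '4' || c == '5' || c == '6' || c == '7' || c == '8') w l)
      = scanP (fun c => c == '0' || c == '1' || c == '2' || c == '3' || c == '4' || c == '5' || c == '6' || c == '7' || c == '8' || c == '9') w l :=
    scanP_merge (fun c => c == '0' || c == '1' || c == '2' || c == '3' || c == '4' || c == '5' || c == '6' || c == '7' || c == '8') '9' w (by decide)
      (by
        intro x hx
        have hdx := hdig x hx
        by_contra hne
        rw [Bool.not_eq_false] at hne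
        simp only [Bool.or_eq_true, beq_iff_eq] at hne
        rcases hne with ((((((((h|h)|h)|h)|h)|h)|h)|h)|h) <;> (subst h; exact absurd hdx (by decide)))
      (by
        intro hmem
        have hdm := hdig '9' (List.mem_cons_of_mem _ hmem)
        exact absurd hdm (by decide))
      l.length l (le_refl _)
  rw [m1, m2, m3, m4, m5, m6, m7, m8, m9]
  have mD : scanP (fun c => c == '0' || c == '1' || c == '2' || c == '3' || c == '4' || c == '5' || c == '6' || c == '7' || c == '8' || c == '9') w l = scanP (fun c => c.isDigit) w l :=
    scanP_congr (fun c => c == '0' || c == '1' || c == '2' || c == '3' || c == '4' || c == '5' || c == '6' || c == '7' || c == '8' || c == '9') (fun c => c.isDigit) w (fun c => char_digit_cases c) l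
  rw [mD]
  have hiin10 := isIn_two_digit_false w hdig a w' hwa ha '1' '0' (by decide) l
  have s10 : pyStep w (scanP (fun c => c.isDigit) w l) (10 : Int)
      = scanP (fun c => c.isDigit) w l := by
    have ht : PySem.Int.toChars 10 = ['1','0'] := by decide
    simp only [pyStep, ht, List.cons_append, List.nil_append]
    rw [if_neg (by simp [hiin10])]
  rw [s10]
  have hiin11 := isIn_two_digit_false w hdig a w' hwa ha '1' '1' (by decide) l
  have s11 : pyStep w (scanP (fun c => c.isDigit) w l) (11 : Int)
      = scanP (fun c => c.isDigit) w l := by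
    have ht : PySem.Int.toChars 11 = ['1','1'] := by decide
    simp only [pyStep, ht, List.cons_append, List.nil_append]
    rw [if_neg (by simp [hiin11])]
  rw [s11]
  have hiin12 := isIn_two_digit_false w hdig a w' hwa ha '1' '2' (by decide) l
  have s12 : pyStep w (scanP (fun c => c.isDigit) w l) (12 : Int)
      = scanP (fun c => c.isDigit) w l := by
    have ht : PySem.Int.toChars 12 = ['1','2'] := by decide
    simp only [pyStep, ht, List.cons_append, List.nil_append]
    rw [if_neg (by simp [hiin12])]
  rw [s12]
  have hiin13 := isIn_two_digit_false w hdig a w' hwa ha '1' '3' (by decide) l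
  have s13 : pyStep w (scanP (fun c => c.isDigit) w l) (13 : Int)
      = scanP (fun c => c.isDigit) w l := by
    have ht : PySem.Int.toChars 13 = ['1','3'] := by decide
    simp only [pyStep, ht, List.cons_append, List.nil_append]
    rw [if_neg (by simp [hiin13])]
  rw [s13]
  have hiin14 := isIn_two_digit_false w hdig a w' hwa ha '1' '4' (by decide) l
  have s14 : pyStep w (scanP (fun c => c.isDigit) w l) (14 : Int)
      = scanP (fun c => c.isDigit) w l := by
    have ht : PySem.Int.toChars 14 = ['1','4'] := by decide
    simp only [pyStep, ht, List.cons_append, List.nil_append]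
    rw [if_neg (by simp [hiin14])]
  rw [s14]
  have hiin15 := isIn_two_digit_false w hdig a w' hwa ha '1' '5' (by decide) l
  have s15 : pyStep w (scanP (fun c => c.isDigit) w l) (15 : Int)
      = scanP (fun c => c.isDigit) w l := by
    have ht : PySem.Int.toChars 15 = ['1','5'] := by decide
    simp only [pyStep, ht, List.cons_append, List.nil_append]
    rw [if_neg (by simp [hiin15])]
  rw [s15]
  have hiin16 := isIn_two_digit_false w hdig a w' hwa ha '1' '6' (by decide) l
  have s16 : pyStep w (scanP (fun c => c.isDigit) w l) (16 : Int)
      = scanP (fun c => c.isDigit) w l := by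
    have ht : PySem.Int.toChars 16 = ['1','6'] := by decide
    simp only [pyStep, ht, List.cons_append, List.nil_append]
    rw [if_neg (by simp [hiin16])]
  rw [s16]
  have hiin17 := isIn_two_digit_false w hdig a w' hwa ha '1' '7' (by decide) l
  have s17 : pyStep w (scanP (fun c => c.isDigit) w l) (17 : Int)
      = scanP (fun c => c.isDigit) w l := by
    have ht : PySem.Int.toChars 17 = ['1','7'] := by decide
    simp only [pyStep, ht, List.cons_append, List.nil_append]
    rw [if_neg (by simp [hiin17])]
  rw [s17]
  have hiin18 := isIn_two_digit_false w hdig a w' hwa ha '1' '8' (by decide) l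
  have s18 : pyStep w (scanP (fun c => c.isDigit) w l) (18 : Int)
      = scanP (fun c => c.isDigit) w l := by
    have ht : PySem.Int.toChars 18 = ['1','8'] := by decide
    simp only [pyStep, ht, List.cons_append, List.nil_append]
    rw [if_neg (by simp [hiin18])]
  rw [s18]
  have hiin19 := isIn_two_digit_false w hdig a w' hwa ha '1' '9' (by decide) l
  have s19 : pyStep w (scanP (fun c => c.isDigit) w l) (19 : Int)
      = scanP (fun c => c.isDigit) w l := by
    have ht : PySem.Int.toChars 19 = ['1','9'] := by decide
    simp only [pyStep, ht, List.cons_append, List.nil_append]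
    rw [if_neg (by simp [hiin19])]
  rw [s19]

-- B's port is the same scan with the named digit predicate
theorem resub_eq_scanP (w : List Char) : ∀ (n : Nat) (l : List Char), l.length ≤ n →
    reSubDigitDash w l = scanP (fun c => c.isDigit) w l := by
  intro n
  induction n with
  | zero =>
    intro l hl
    have : l = [] := by cases l <;> simp_all
    subst this; simp [reSubDigitDash, scanP]
  | succ n ih =>
    intro l hl
    cases l with
    | nil => simp [reSubDigitDash, scanP]
    | cons c t =>
      by_cases h : (c.isDigit && ('-' :: w).isPrefixOf t) = true
      · rw [reSubDigitDash, if_pos h, scanP_cons_pos _ w c t h,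
          ih (List.drop (w.length + 1) t) (by simp at hl ⊢; omega)]
      · rw [reSubDigitDash, if_neg h, scanP_cons_neg _ w c t (Bool.eq_false_iff.mpr h),
          ih t (by simp at hl; omega)]

theorem resub_eq (w l : List Char) :
    reSubDigitDash w l = scanP (fun c => c.isDigit) w l :=
  resub_eq_scanP w l.length l (le_refl _)

-- ===== VERDICT (by name: the statement is the Claim_ definition above) =====
set_option maxRecDepth 4096 in
theorem get_synonym_spec : Claim_equal_get_synonym := by
  intro compound _
  unfold Spec_get_synonym
  show String.ofList
      ((PySem.List.pyRange 0 20 1).foldl (pyStep ['b','e','t','a'])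
        ((PySem.List.pyRange 0 20 1).foldl (pyStep ['a','l','p','h','a']) compound.toList))
    = String.ofList
      (reSubDigitDash ['b','e','t','a'] (reSubDigitDash ['a','l','p','h','a'] compound.toList))
  have halpha : ∀ c ∈ ('-' :: ['a','l','p','h','a']), c.isDigit = false := by
    intro c hc; fin_cases hc <;> rfl
  have hbeta : ∀ c ∈ ('-' :: ['b','e','t','a']), c.isDigit = false := by
    intro c hc; fin_cases hc <;> rfl
  rw [chain_scan ['a','l','p','h','a'] halpha 'a' ['l','p','h','a'] rfl (by decide)]
  rw [chain_scan ['b','e','t','a'] hbeta 'b' ['e','t','a'] rfl (by decide)]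
  rw [resub_eq, resub_eq]
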